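-- pv_equiv track=rewrite | github.com/mikahama/FinMeter | finmeter/finmeter.py | full_rhyme
-- ===== SOURCE A (Python) =====
-- consonants = ["q","w","r","t","p","s","d","f","g","h","j","k","l","z","x","c","v","b","n","m"]
--
-- def full_rhyme(word1, word2):
-- 	"""
-- 	Check if words rhyme fully (they are identical from the first vowel onwards) e.g. katti and patti
-- 	:param word1: a word "tatti"
-- 	:param word2: another word "mappi"
-- 	:return: result e.g. False
-- 	"""
-- 	try:
-- 		word1 = word1.lower()
-- 		word2 = word2.lower()
--
-- 		if word1 == word2:
-- 			#If the words are exactly the same, they don't rhyme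
-- 			return False
-- 		while True:
-- 			#strip off leading consonants for word1
-- 			if len(word1) == 0:
-- 				return False
-- 			elif word1[0] in consonants:
-- 				word1 = word1[1:]
-- 			else:
-- 				break
-- 		while True:
-- 			#strip off leading consonants for word2
-- 			if len(word2) == 0:
-- 				return False
-- 			elif word2[0] in consonants:
-- 				word2 = word2[1:]
-- 			else:
-- 				break
-- 		if len(word1) < len(word2):
-- 			#make word1 the longer one
-- 			temp = word1
-- 			word1 = word2
-- 			word2 = temp
-- 		difference = len(word1) - len(word2)
-- 		word1 = word1[difference:]
-- 		if word2 == word1: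
-- 			return True
-- 		else:
-- 			return False
-- 	except:
-- 		return False
-- ===== SOURCE B (Python) =====
-- consonants = ["q","w","r","t","p","s","d","f","g","h","j","k","l","z","x","c","v","b","n","m"]
--
-- def full_rhyme(word1, word2):
--     """Same check, by a single index-scan per word plus one endswith."""
--     w1 = word1.lower()
--     w2 = word2.lower()
--     if w1 == w2:
--         return False
--     i = next((k for k, c in enumerate(w1) if c not in consonants), None)
--     j = next((k for k, c in enumerate(w2) if c not in consonants), None)
--     if i is None or j is None:
--         return False
--     s1, s2 = w1[i:], w2[j:]
--     return s2.endswith(s1) if len(s1) < len(s2) else s1.endswith(s2)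
-- ===== Notes on version B (the rewrite author's own statement) =====
-- stated objective: simpler
-- what changed: Replaces A's two destructive while-loops that repeatedly reslice each word, the explicit swap, and the slice-then-equality compare by one first-vowel index scan per word and a single endswith on the longer onset.
import Mathlib
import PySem

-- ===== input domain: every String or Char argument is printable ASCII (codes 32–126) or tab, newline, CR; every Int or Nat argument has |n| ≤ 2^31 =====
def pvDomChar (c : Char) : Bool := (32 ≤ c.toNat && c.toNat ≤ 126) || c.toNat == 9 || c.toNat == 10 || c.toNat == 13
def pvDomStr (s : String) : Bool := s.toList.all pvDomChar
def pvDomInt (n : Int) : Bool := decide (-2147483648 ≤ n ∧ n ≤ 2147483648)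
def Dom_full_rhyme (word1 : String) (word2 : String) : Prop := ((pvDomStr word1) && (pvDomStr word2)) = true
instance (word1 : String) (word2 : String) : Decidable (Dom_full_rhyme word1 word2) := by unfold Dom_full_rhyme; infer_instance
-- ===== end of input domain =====

-- B replaces A's two destructive strip-loops and explicit swap/slice/compare by a single
-- first-vowel index scan per word and one endswith on the longer onset (objective: simpler).
-- A's try/except only fires on non-string arguments, outside the String domain considered here.

-- ===== PORT A =====
def pvConsonants : List Char :=
  ['q','w','r','t','p','s','d','f','g','h','j','k','l','z','x','c','v','b','n','m']

-- A's "while True" strip loop: none = the loop hit the empty string ("return False")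
def pvStrip : List Char → Option (List Char)
  | [] => none
  | c :: rest => if c ∈ pvConsonants then pvStrip rest else some (c :: rest)

def full_rhyme (word1 : String) (word2 : String) : Bool :=
  let w1 := PySem.Chars.lower word1.toList
  let w2 := PySem.Chars.lower word2.toList
  if w1 = w2 then false
  else
    match pvStrip w1 with
    | none => false
    | some a =>
      match pvStrip w2 with
      | none => false
      | some b =>
        -- make word1 the longer one
        let x := if a.length < b.length then b else a
        let y := if a.length < b.length then a else b
        let difference : Int := (x.length : Int) - (y.length : Int)
        let x' := PySem.List.slice x (some difference) none
        y == x'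

-- ===== PORT B =====
def full_rhyme_alt (word1 : String) (word2 : String) : Bool :=
  let w1 := PySem.Chars.lower word1.toList
  let w2 := PySem.Chars.lower word2.toList
  if w1 = w2 then false
  else
    match w1.findIdx? (fun c => !pvConsonants.contains c),
          w2.findIdx? (fun c => !pvConsonants.contains c) with
    | some i, some j =>
      let s1 := w1.drop i
      let s2 := w2.drop j
      if s1.length < s2.length then PySem.Chars.endswith s2 s1 else PySem.Chars.endswith s1 s2
    | _, _ => false

-- ===== PRECONDITION & SPEC =====
def Spec_full_rhyme (word1 : String) (word2 : String) (out : Bool) : Prop := out = full_rhyme_alt word1 word2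
instance (word1 : String) (word2 : String) (out : Bool) : Decidable (Spec_full_rhyme word1 word2 out) := by unfold Spec_full_rhyme; infer_instance

-- ===== CLAIM (what is proved, stated in full; the proofs are below) =====
def Claim_equal_full_rhyme : Prop := ∀ (word1 : String) (word2 : String), Dom_full_rhyme word1 word2 → Spec_full_rhyme word1 word2 (full_rhyme word1 word2)

-- ===== LEMMAS AND PROOFS =====

-- A's strip loop returns exactly the drop at B's first-vowel index.
theorem pvStrip_eq_findIdx? (s : List Char) :
    pvStrip s = (s.findIdx? (fun c => !pvConsonants.contains c)).map (s.drop ·) := by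
  induction s with
  | nil => rfl
  | cons c rest ih =>
    by_cases h : c ∈ pvConsonants
    · simp only [pvStrip, h, if_pos, ih, List.findIdx?_cons]
      cases rest.findIdx? (fun c => !pvConsonants.contains c) <;> simp [h]
    · simp [pvStrip, h, List.findIdx?_cons]

-- A's slice-then-compare is endswith, for the longer listed first.
theorem pv_drop_eq_endswith (x y : List Char) (h : y.length ≤ x.length) :
    (y == PySem.List.slice x (some ((x.length : Int) - (y.length : Int))) none)
      = PySem.Chars.endswith x y := by
  have hd : PySem.List.slice x (some ((x.length : Int) - (y.length : Int))) none
      = x.drop (x.length - y.length) := by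
    have : ((x.length : Int) - (y.length : Int)) = ((x.length - y.length : Nat) : Int) := by omega
    rw [this, PySem.List.slice_from_natCast]
  rw [hd]
  by_cases he : PySem.Chars.endswith x y = true
  · have := (PySem.Chars.endswith_iff x y).mp he
    rw [List.suffix_iff_eq_drop] at this
    simp [he, ← this]
  · simp only [Bool.not_eq_true] at he
    rw [he, beq_eq_false_iff_ne]
    intro hc
    have : y <:+ x := List.suffix_iff_eq_drop.mpr hc
    rw [← PySem.Chars.endswith_iff] at this
    simp [this] at he

-- ===== VERDICT (by name: the statement is the Claim_ definition above) =====
theorem full_rhyme_spec : Claim_equal_full_rhyme := by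
  intro word1 word2 _
  unfold Spec_full_rhyme full_rhyme full_rhyme_alt
  simp only [pvStrip_eq_findIdx?]
  set w1 := PySem.Chars.lower word1.toList
  set w2 := PySem.Chars.lower word2.toList
  by_cases h12 : w1 = w2
  · simp [h12]
  · simp only [h12, if_false]
    cases hi : w1.findIdx? (fun c => !pvConsonants.contains c) with
    | none => simp
    | some i =>
      cases hj : w2.findIdx? (fun c => !pvConsonants.contains c) with
      | none => simp
      | some j =>
        simp only [Option.map_some]
        by_cases hlen : (w1.drop i).length < (w2.drop j).length
        · simp only [hlen, if_pos]
          exact pv_drop_eq_endswith _ _ (le_of_lt hlen)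
        · simp only [hlen, if_false]
          exact pv_drop_eq_endswith _ _ (le_of_not_gt hlen)
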